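-- pv_equiv track=rewrite | github.com/csea-lab/csea-lab | WIP - BIDS and fMRIPrep/extract_fmri_settings.py | combine_subsettings
-- ===== SOURCE A (Python) =====
-- def combine_subsettings(lines: str) -> dict:
--     """
--     Returns a dictionary with all subsettings placed in lists attached to their main settings.
--     """
--
--     combined_dict = {}
--
--     for i, target_line in enumerate(lines):
--         if not is_subsetting(target_line):
--             combined_dict[target_line] = []
--         else:
--             for line in reversed(lines[0:i]):
--                 if not is_subsetting(line):
--                     combined_dict[line].append(target_line)
--                     break
--
--     return combined_dict
--
-- def is_subsetting(line: str) -> bool: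
--     """
--     Returns true if a line is a subsetting.
--
--     A line is a subsetting if the beginning of it is an empty space.
--     """
--
--     return line[0:1] == " "
-- ===== SOURCE B (Python) =====
-- def combine_subsettings(lines: str) -> dict:
--     """
--     Returns a dictionary with all subsettings placed in lists attached to their main settings.
--     Single pass: remember the last main setting seen and append subsettings to it.
--     """
--     combined_dict = {}
--     last_main = None
--     for line in lines:
--         if line.startswith(" "):
--             if last_main is not None:
--                 combined_dict[last_main].append(line)
--         else:
--             combined_dict[line] = []
--             last_main = line
--     return combined_dict
-- ===== Notes on version B (the rewrite author's own statement) =====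
-- stated objective: alternative
-- what changed: Replaced the inner backward scan over lines[0:i] for each subsetting line with a single forward pass that remembers the last main setting seen and appends directly to its list.
import Mathlib
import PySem

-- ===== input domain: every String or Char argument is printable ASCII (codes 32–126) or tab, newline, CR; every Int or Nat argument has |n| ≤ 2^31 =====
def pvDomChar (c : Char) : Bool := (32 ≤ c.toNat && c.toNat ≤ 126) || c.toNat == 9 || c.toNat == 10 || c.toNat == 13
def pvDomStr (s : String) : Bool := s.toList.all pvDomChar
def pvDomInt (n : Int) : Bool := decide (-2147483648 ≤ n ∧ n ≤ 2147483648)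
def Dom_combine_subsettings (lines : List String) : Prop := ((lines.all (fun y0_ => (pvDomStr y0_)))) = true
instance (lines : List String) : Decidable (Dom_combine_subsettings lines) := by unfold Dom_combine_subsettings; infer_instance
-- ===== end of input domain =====

-- B replaces A's inner backward scan for the preceding main setting with a single
-- forward pass that remembers the last main setting seen (alternative algorithm).
-- Equivalence is about the RETURN value; neither program mutates its argument.


-- ===== PORT A =====
-- is_subsetting(line): line[0:1] == " "
def pvIsSubsetting (line : String) : Bool :=
  PySem.Str.slice line (some 0) (some 1) == " "

-- inner loop: for line in reversed(lines[0:i]): if not is_subsetting(line): combined_dict[line].append(target_line); break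
-- (combined_dict[line].append ported as Dict.modify; the scanned line is always a present key, so the default is never consulted)
def pvFindMain (d : PySem.Dict String (List String)) (rev : List String) (t : String) :
    PySem.Dict String (List String) :=
  match rev with
  | [] => d
  | l :: rest =>
    if !pvIsSubsetting l then d.modify l [] (· ++ [t]) else pvFindMain d rest t

def pvStepA (lines : List String) (d : PySem.Dict String (List String)) (p : Int × String) :
    PySem.Dict String (List String) :=
  if !pvIsSubsetting p.2 then d.insert p.2 []
  else pvFindMain d ((PySem.List.slice lines (some 0) (some p.1)).reverse) p.2

def combine_subsettings (lines : List String) : List (String × List String) :=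
  ((PySem.List.enumerate lines 0).foldl (pvStepA lines) PySem.Dict.empty).items

-- ===== PORT B =====
def pvStepB (s : PySem.Dict String (List String) × Option String) (line : String) :
    PySem.Dict String (List String) × Option String :=
  if PySem.Str.startswith line " " then
    match s.2 with
    | some last => (s.1.modify last [] (· ++ [line]), s.2)
    | none => s
  else (s.1.insert line [], some line)

def combine_subsettings_alt (lines : List String) : List (String × List String) :=
  (lines.foldl pvStepB (PySem.Dict.empty, none)).1.items

-- ===== PRECONDITION & SPEC =====
def Spec_combine_subsettings (lines : List String) (out : List (String × List String)) : Prop := out = combine_subsettings_alt lines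
instance (lines : List String) (out : List (String × List String)) : Decidable (Spec_combine_subsettings lines out) := by unfold Spec_combine_subsettings; infer_instance

-- ===== CLAIM (what is proved, stated in full; the proofs are below) =====
def Claim_equal_combine_subsettings : Prop := ∀ (lines : List String), Dom_combine_subsettings lines → Spec_combine_subsettings lines (combine_subsettings lines)

-- ===== LEMMAS AND PROOFS =====

theorem pv_ofList_eq_space (l : List Char) : (String.ofList l = " ") ↔ l = [' '] := by
  constructor
  · intro h; have := congrArg String.toList h; simpa using this
  · rintro rfl; rfl

-- the two helper tests agree: line[0:1] == " "  ↔  line.startswith(" ")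
theorem pv_sub_eq (line : String) :
    pvIsSubsetting line = PySem.Str.startswith line " " := by
  unfold pvIsSubsetting
  simp [PySem.Str.slice, PySem.Str.startswith, PySem.Chars.startswith]
  cases h : line.toList with
  | nil => simp [PySem.List.slice]
  | cons c t =>
    simp [PySem.List.slice, List.isPrefixOf]
    rw [pv_ofList_eq_space]
    simp [eq_comm]

-- A's inner backward scan applies the append at the first non-subsetting line of rev
theorem pvFindMain_eq (d : PySem.Dict String (List String)) (rev : List String) (t : String) :
    pvFindMain d rev t =
      match rev.find? (fun l => !pvIsSubsetting l) with
      | some m => d.modify m [] (· ++ [t])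
      | none => d := by
  induction rev with
  | nil => rfl
  | cons l rest ih =>
    simp only [pvFindMain, List.find?]
    by_cases h : pvIsSubsetting l <;> simp [h, ih]

-- loop invariant: processing the suffix `rest` after the prefix `pre`, A's fold over the
-- suffix of the enumeration equals B's fold whose carried "last main" is the first
-- non-subsetting line of pre.reverse
theorem pv_loop_eq :
    ∀ (rest pre : List String) (d : PySem.Dict String (List String)),
      (PySem.List.enumerate rest (pre.length : Int)).foldl (pvStepA (pre ++ rest)) d
        = (rest.foldl pvStepB (d, pre.reverse.find? (fun l => !pvIsSubsetting l))).1 := by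
  intro rest
  induction rest with
  | nil => intro pre d; simp [PySem.List.enumerate_nil]
  | cons t rest ih =>
    intro pre d
    rw [PySem.List.enumerate_cons]
    simp only [List.foldl_cons]
    have hfull : pre ++ t :: rest = (pre ++ [t]) ++ rest := by simp
    have hlen : ((pre.length : Int) + 1) = (((pre ++ [t]).length : Nat) : Int) := by
      simp
    by_cases h : pvIsSubsetting t
    · -- t is a subsetting: A scans lines[0:i] backwards, B uses the carried last main
      have hst : PySem.Chars.startswith t.toList [' '] = true := by
        have h2 := (pv_sub_eq t).symm.trans h
        simpa [PySem.Str.startswith] using h2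
      have hslice : PySem.List.slice (pre ++ t :: rest) (some 0) (some (pre.length : Int))
          = pre := by
        rw [PySem.List.slice_zero_start, PySem.List.slice_to_natCast]
        exact List.take_left
      have hcarry : (pre ++ [t]).reverse.find? (fun l => !pvIsSubsetting l)
          = pre.reverse.find? (fun l => !pvIsSubsetting l) := by
        simp [h]
      cases hfind : pre.reverse.find? (fun l => !pvIsSubsetting l) with
      | none =>
        have hA : pvStepA (pre ++ t :: rest) d ((pre.length : Int), t) = d := by
          simp only [pvStepA, h, Bool.not_true, Bool.false_eq_true, if_false]
          rw [hslice, pvFindMain_eq, hfind]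
        have hB : pvStepB (d, none) t = (d, none) := by simp [pvStepB, hst]
        rw [hA, hfull, hlen, ih (pre ++ [t]), hcarry, hfind, hB]
      | some m =>
        have hA : pvStepA (pre ++ t :: rest) d ((pre.length : Int), t)
            = d.modify m [] (· ++ [t]) := by
          simp only [pvStepA, h, Bool.not_true, Bool.false_eq_true, if_false]
          rw [hslice, pvFindMain_eq, hfind]
        have hB : pvStepB (d, some m) t = (d.modify m [] (· ++ [t]), some m) := by
          simp [pvStepB, hst]
        rw [hA, hfull, hlen, ih (pre ++ [t]), hcarry, hfind, hB]
    · -- t is a main setting: both insert t with an empty list; the new last main is t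
      have hst : PySem.Chars.startswith t.toList [' '] = false := by
        have h2 : PySem.Str.startswith t " " = false := by rw [← pv_sub_eq]; simpa using h
        simpa [PySem.Str.startswith] using h2
      have hA : pvStepA (pre ++ t :: rest) d ((pre.length : Int), t) = d.insert t [] := by
        simp [pvStepA, h]
      have hB : pvStepB (d, pre.reverse.find? (fun l => !pvIsSubsetting l)) t
          = (d.insert t [], some t) := by
        simp [pvStepB, hst]
      have hcarry : (pre ++ [t]).reverse.find? (fun l => !pvIsSubsetting l) = some t := by
        simp [h]
      rw [hA, hB, hfull, hlen, ih (pre ++ [t]), hcarry]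

-- ===== VERDICT (by name: the statement is the Claim_ definition above) =====
theorem combine_subsettings_spec : Claim_equal_combine_subsettings := by
  intro lines _
  unfold Spec_combine_subsettings combine_subsettings combine_subsettings_alt
  have := pv_loop_eq lines [] PySem.Dict.empty
  simpa using congrArg PySem.Dict.items this
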